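-- pv_equiv track=rewrite | github.com/adennguyen21/DATA-221-Assignment-2-By-Aden-N | Question 3.py | group_near_duplicates
-- ===== SOURCE A (Python) =====
-- def clean_lines(line):
--     # Cleans the line so that it's lowercase and there is no whitespaces or punctuation.
--     clean_line = ""
--     for letter in line:
--         if letter.isalnum():  # Keep only letters and numbers
--             clean_line += letter.lower() # Lowercase
--
--     return clean_line
--
-- def group_near_duplicates(line_list):
--     # Puts the clean line as a key with its values as the line number and original line.
--     # Also groups together near duplicate lines in a list.
--     near_duplicates_dictionary= {}
--
--     for line_number, line in line_list:
--         key = clean_lines(line)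
--
--         if key not in near_duplicates_dictionary:
--             near_duplicates_dictionary[key] = []
--
--         near_duplicates_dictionary[key].append((line_number, line))
--
--     return near_duplicates_dictionary
-- ===== SOURCE B (Python) =====
-- def clean_lines(line):
--     # Cleans the line so that it's lowercase and there is no whitespaces or punctuation.
--     return "".join(ch.lower() for ch in line if ch.isalnum())
--
-- def group_near_duplicates(line_list):
--     # Two-pass grouping: clean every line once, take the distinct keys in first-occurrence
--     # order, then build each group by scanning the cleaned/original pairs for that key.
--     cleaned = [clean_lines(line) for _, line in line_list]
--     keys = list(dict.fromkeys(cleaned))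
--     return {k: [entry for c, entry in zip(cleaned, line_list) if c == k] for k in keys}
-- ===== Notes on version B (the rewrite author's own statement) =====
-- stated objective: alternative
-- what changed: Replaces the single-pass dict-building loop (membership test + in-place append per line) with a two-pass decomposition: clean all lines once, dedup the cleaned keys in first-occurrence order, then build each group by a per-key comprehension over the cleaned/original pairs.
import Mathlib
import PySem

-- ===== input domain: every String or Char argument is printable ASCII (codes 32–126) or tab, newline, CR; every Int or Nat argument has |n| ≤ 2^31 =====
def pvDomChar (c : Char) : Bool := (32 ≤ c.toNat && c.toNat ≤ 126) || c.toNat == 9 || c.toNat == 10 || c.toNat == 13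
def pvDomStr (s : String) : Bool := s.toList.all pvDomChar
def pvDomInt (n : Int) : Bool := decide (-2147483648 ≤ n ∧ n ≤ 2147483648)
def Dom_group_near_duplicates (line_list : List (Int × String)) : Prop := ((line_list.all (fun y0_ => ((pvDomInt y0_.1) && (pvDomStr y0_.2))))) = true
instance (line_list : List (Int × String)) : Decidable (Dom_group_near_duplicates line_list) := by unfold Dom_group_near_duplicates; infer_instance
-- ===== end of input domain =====

-- B replaces A's single-pass dict-building loop with a two-pass decomposition (clean once,
-- dedup the keys, build each group by a per-key scan); objective: alternative, same results.

-- ===== PORT A =====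
-- A's clean_lines: character loop accumulating the lowercased alphanumeric characters.
def clean_lines (line : String) : String :=
  String.mk (line.toList.foldl
    (fun acc c => if PySem.Chars.isalnum c then acc ++ [PySem.Chars.lowerChar c] else acc) [])

def group_near_duplicates (line_list : List (Int × String)) : List (String × List (Int × String)) :=
  (line_list.foldl
    (fun d p =>
      let key := clean_lines p.2
      let d := if d.contains key then d else d.insert key ([] : List (Int × String))
      d.modify key [] (fun v => v ++ [p]))
    (PySem.Dict.empty : PySem.Dict String (List (Int × String)))).items

-- ===== PORT B =====
-- B's clean_lines: join of a filter/map comprehension.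
def clean_lines_alt (line : String) : String :=
  String.mk ((line.toList.filter PySem.Chars.isalnum).map PySem.Chars.lowerChar)

def group_near_duplicates_alt (line_list : List (Int × String)) : List (String × List (Int × String)) :=
  let cleaned := line_list.map (fun p => clean_lines_alt p.2)
  let keys := PySem.List.dedup cleaned
  keys.map (fun k => (k, ((cleaned.zip line_list).filter (fun q => q.1 == k)).map (fun q => q.2)))

-- ===== PRECONDITION & SPEC =====
def Spec_group_near_duplicates (line_list : List (Int × String)) (out : List (String × List (Int × String))) : Prop := out = group_near_duplicates_alt line_list
instance (line_list : List (Int × String)) (out : List (String × List (Int × String))) : Decidable (Spec_group_near_duplicates line_list out) := by unfold Spec_group_near_duplicates; infer_instance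

-- ===== CLAIM (what is proved, stated in full; the proofs are below) =====
def Claim_equal_group_near_duplicates : Prop := ∀ (line_list : List (Int × String)), Dom_group_near_duplicates line_list → Spec_group_near_duplicates line_list (group_near_duplicates line_list)

-- ===== LEMMAS AND PROOFS =====

theorem clean_lines_eq_alt (line : String) : clean_lines line = clean_lines_alt line := by
  simp [clean_lines, clean_lines_alt, PySem.List.foldl_append_if]

theorem map_pair_eq_zip {A B : Type} (l : List A) (f : A → B) :
    l.map (fun p => (f p, p)) = (l.map f).zip l := by
  induction l with
  | nil => rfl
  | cons x xs ih => simpa using ih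

-- The "insert [] if absent, then append" body of A's loop is one `modify`.
theorem step_fuse (d : PySem.Dict String (List (Int × String))) (k : String)
    (p : Int × String) :
    ((if d.contains k then d else d.insert k ([] : List (Int × String))).modify k []
      (fun v => v ++ [p])) = d.modify k [] (fun v => v ++ [p]) := by
  by_cases h : d.contains k = true
  · simp [h]
  · have hf : d.contains k = false := by simpa using h
    simp [h, PySem.Dict.modify, PySem.Dict.getD_insert_self, PySem.Dict.insert_insert_self,
      PySem.Dict.getD_of_not_contains d (k := k) [] hf]

theorem group_near_duplicates_spec_aux (line_list : List (Int × String)) :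
    group_near_duplicates line_list = group_near_duplicates_alt line_list := by
  unfold group_near_duplicates group_near_duplicates_alt
  simp only [clean_lines_eq_alt]
  -- fuse A's loop body into a single modify
  have hbody : (fun (d : PySem.Dict String (List (Int × String))) (p : Int × String) =>
        let key := clean_lines_alt p.2
        let d' := if d.contains key then d else d.insert key ([] : List (Int × String))
        d'.modify key [] (fun v => v ++ [p]))
      = (fun d p => d.modify (clean_lines_alt p.2) [] (fun v => v ++ [p])) := by
    funext d p
    exact step_fuse d (clean_lines_alt p.2) p
  rw [hbody]
  -- view A's fold as a fold over the (key, entry) pairs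
  have hmap : line_list.foldl (fun d p => d.modify (clean_lines_alt p.2) [] (fun v => v ++ [p]))
        (PySem.Dict.empty : PySem.Dict String (List (Int × String)))
      = (line_list.map (fun p => (clean_lines_alt p.2, p))).foldl
          (fun d q => d.modify q.1 [] (fun v => v ++ [q.2])) PySem.Dict.empty := by
    rw [List.foldl_map]
  rw [hmap]
  set L := line_list.map (fun p => (clean_lines_alt p.2, p)) with hL
  have hnodup : ((L.foldl (fun d q => d.modify q.1 [] (fun v => v ++ [q.2]))
      (PySem.Dict.empty : PySem.Dict String (List (Int × String)))).keys).Nodup := by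
    exact PySem.Dict.nodup_keys_foldl_modify_key L Prod.fst []
      (fun d q v => v ++ [q.2]) PySem.Dict.empty (by simp)
  rw [PySem.Dict.items_eq_map_keys _ hnodup []]
  have hkeys : (L.foldl (fun d q => d.modify q.1 [] (fun v => v ++ [q.2]))
      (PySem.Dict.empty : PySem.Dict String (List (Int × String)))).keys
      = PySem.Set.ofList (L.map Prod.fst) := by
    rw [PySem.Dict.keys_foldl_modify_key L Prod.fst [] (fun d q v => v ++ [q.2])]
    simp [PySem.Dict.keys_empty, PySem.Set.update_nil_left]
  rw [hkeys]
  have hzip : L = (line_list.map (fun p => clean_lines_alt p.2)).zip line_list := by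
    rw [hL]; exact map_pair_eq_zip line_list (fun p => clean_lines_alt p.2)
  have hfst : L.map Prod.fst = line_list.map (fun p => clean_lines_alt p.2) := by
    simp [hL]
  rw [PySem.List.dedup_eq_ofList, ← hzip, hfst]
  apply List.map_congr_left
  intro k hk
  simp only [Prod.mk.injEq, true_and]
  simpa using PySem.Dict.getD_foldl_modify_append L PySem.Dict.empty k

-- ===== VERDICT (by name: the statement is the Claim_ definition above) =====
theorem group_near_duplicates_spec : Claim_equal_group_near_duplicates := by
  intro line_list _
  unfold Spec_group_near_duplicates
  exact group_near_duplicates_spec_aux line_list
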